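-- pv_equiv track=rewrite | github.com/ZeroNLP/Clean_LaVe | Clean_LaVE4REMul/utils/clean.py | eliminate_noRelation
-- ===== SOURCE A (Python) =====
-- def eliminate_noRelation(data, rel_key='rel'):
--     not_norelation_index = []
--     for i, rel in enumerate(data[rel_key]):
--         if rel != 'no_relation':
--             not_norelation_index.append(i)
--     for k, _ in data.items():
--         data[k] = [data[k][val_idx] for val_idx in not_norelation_index]
--     return data
-- ===== SOURCE B (Python) =====
-- def eliminate_noRelation(data, rel_key='rel'):
--     keys = list(data)
--     ridx = keys.index(rel_key)
--     rows = [row for row in zip(*(data[k] for k in keys)) if row[ridx] != 'no_relation']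
--     for j, k in enumerate(keys):
--         data[k] = [row[j] for row in rows]
--     return data
-- ===== Notes on version B (the rewrite author's own statement) =====
-- stated objective: alternative
-- what changed: B works row-wise instead of column-wise: it transposes the columns into rows with zip(*columns), filters out the rows whose relation field is 'no_relation', and rebuilds each column from the surviving rows — no integer index table and no per-column scan of the rel column.
import Mathlib
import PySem

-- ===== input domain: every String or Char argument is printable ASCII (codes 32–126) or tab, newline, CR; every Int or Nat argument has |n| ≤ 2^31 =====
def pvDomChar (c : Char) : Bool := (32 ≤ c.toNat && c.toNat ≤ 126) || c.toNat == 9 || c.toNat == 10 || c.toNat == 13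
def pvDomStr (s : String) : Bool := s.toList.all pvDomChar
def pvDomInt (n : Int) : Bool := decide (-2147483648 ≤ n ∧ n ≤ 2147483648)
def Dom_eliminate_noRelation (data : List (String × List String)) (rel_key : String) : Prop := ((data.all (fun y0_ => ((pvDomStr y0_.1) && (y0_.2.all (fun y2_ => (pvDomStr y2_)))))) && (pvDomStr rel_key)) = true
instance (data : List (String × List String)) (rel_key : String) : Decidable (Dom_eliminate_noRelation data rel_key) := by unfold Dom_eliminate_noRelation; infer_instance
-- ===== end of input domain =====

-- B replaces A's column-wise build-index-table-then-lookup algorithm by a row-wise one: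
-- transpose the columns into rows (zip), filter the rows by their relation field, rebuild the
-- columns (objective: alternative). Both Pythons mutate the dict in place identically; the
-- equivalence below is about the returned value.

-- ===== PORT A =====
-- data[rel_key]: the .getD [] default is unreachable under Pre_ (Python raises KeyError there)
def pvRelCol (data : List (String × List String)) (rel_key : String) : List String :=
  ((PySem.Dict.mk data).get? rel_key).getD []

-- first loop: not_norelation_index
def pvIdxs (data : List (String × List String)) (rel_key : String) : List Int :=
  (PySem.List.enumerate (pvRelCol data rel_key)).foldl
    (fun acc (p : Int × String) => if p.2 ≠ "no_relation" then acc ++ [p.1] else acc) []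

-- [data[k][i] for i in idxs]; the .getD "" default is unreachable under Pre_ (Python raises IndexError there)
def pvSelect (idxs : List Int) (col : List String) : List String :=
  idxs.foldl (fun acc i => acc ++ [(PySem.List.pyGet? col i).getD ""]) []

def eliminate_noRelation (data : List (String × List String)) (rel_key : String) : List (String × List String) :=
  (((PySem.Dict.mk data).keys).foldl
      (fun dd k => dd.insert k (pvSelect (pvIdxs data rel_key) ((dd.get? k).getD [])))
      (PySem.Dict.mk data)).items

-- ===== PORT B =====
-- termination helper for pvRows (cited by its decreasing_by)
theorem pvSumTail_le (l : List (List String)) :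
    ((l.map List.tail).map List.length).sum ≤ (l.map List.length).sum := by
  induction l with
  | nil => simp
  | cons x xs ih =>
    simp only [List.map_cons, List.sum_cons, List.length_tail]
    omega

-- zip(*cols): the rows of the transpose, truncated at the shortest column (empty for no columns)
def pvRows (cols : List (List String)) : List (List String) :=
  match cols with
  | [] => []
  | c :: rest =>
    if (c :: rest).all (fun col => !col.isEmpty) then
      ((c :: rest).map (fun col => col.headD "")) :: pvRows ((c :: rest).map List.tail)
    else []
termination_by (cols.map List.length).sum
decreasing_by
  rename_i h
  simp only [List.all_cons, List.all_eq_true, Bool.and_eq_true, Bool.not_eq_true',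
    List.isEmpty_eq_false_iff] at h
  have hle := pvSumTail_le rest
  have hc : c.tail.length < c.length := by
    have := h.1
    cases c with
    | nil => simp at this
    | cons a t => simp
  simp only [List.map_cons, List.sum_cons]
  omega

-- ridx = keys.index(rel_key): the .getD 0 default is unreachable under Pre_ (Python raises ValueError there)
def eliminate_noRelation_alt (data : List (String × List String)) (rel_key : String) : List (String × List String) :=
  let keys := (PySem.Dict.mk data).keys
  let ridx : Nat := (PySem.List.index? keys rel_key).getD 0
  let rows := (pvRows (keys.map (fun k => ((PySem.Dict.mk data).get? k).getD []))).filter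
      (fun row => (PySem.List.pyGet? row (ridx : Int)).getD "" ≠ "no_relation")
  ((PySem.List.enumerate keys).foldl
      (fun dd (p : Int × String) =>
        dd.insert p.2 (rows.map (fun row => (PySem.List.pyGet? row p.1).getD "")))
      (PySem.Dict.mk data)).items

-- ===== PRECONDITION & SPEC =====
-- Pre_ excludes: (i) a missing rel_key (A raises KeyError, B ValueError); (ii) columns too short
-- for some kept index of the rel column (A raises IndexError); (iii) association lists with
-- duplicate keys, which do not faithfully represent a Python dict argument.
def Pre_eliminate_noRelation (data : List (String × List String)) (rel_key : String) : Prop :=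
  (data.map Prod.fst).Nodup ∧
  ((PySem.Dict.mk data).get? rel_key).isSome = true ∧
  (∀ p ∈ data, ∀ i ∈ List.range (((PySem.Dict.mk data).get? rel_key).getD []).length,
      (((PySem.Dict.mk data).get? rel_key).getD []).getD i "" ≠ "no_relation" → i < p.2.length)
instance (data : List (String × List String)) (rel_key : String) : Decidable (Pre_eliminate_noRelation data rel_key) := by unfold Pre_eliminate_noRelation; infer_instance

def pvWitness_eliminate_noRelation : (List (String × List String)) × String :=
  ([("rel", ["a", "no_relation", "b"]), ("tok", ["t1", "t2", "t3"])], "rel")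

def Spec_eliminate_noRelation (data : List (String × List String)) (rel_key : String) (out : List (String × List String)) : Prop := out = eliminate_noRelation_alt data rel_key
instance (data : List (String × List String)) (rel_key : String) (out : List (String × List String)) : Decidable (Spec_eliminate_noRelation data rel_key out) := by unfold Spec_eliminate_noRelation; infer_instance

-- ===== CLAIM (what is proved, stated in full; the proofs are below) =====
def Claim_equal_eliminate_noRelation : Prop := ∀ (data : List (String × List String)) (rel_key : String), Dom_eliminate_noRelation data rel_key → Pre_eliminate_noRelation data rel_key → Spec_eliminate_noRelation data rel_key (eliminate_noRelation data rel_key)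

-- ===== LEMMAS AND PROOFS =====

-- the kept indices of the rel column, starting at position s
def pvKept (rs : List String) (s : Nat) : List Int :=
  match rs with
  | [] => []
  | r :: rs' => (if r ≠ "no_relation" then [((s : Nat) : Int)] else []) ++ pvKept rs' (s + 1)

-- the common filtered column: keep cs[i] where rs[i] ≠ "no_relation", truncating at the shorter list
def pvFilt (cs rs : List String) : List String :=
  match cs, rs with
  | c :: cs', r :: rs' => if r ≠ "no_relation" then c :: pvFilt cs' rs' else pvFilt cs' rs'
  | _, _ => []

theorem pvKept_enumerate (rs : List String) (s : Nat) (acc : List Int) :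
    (PySem.List.enumerate rs (s : Int)).foldl
      (fun acc (p : Int × String) => if p.2 ≠ "no_relation" then acc ++ [p.1] else acc) acc
    = acc ++ pvKept rs s := by
  induction rs generalizing s acc with
  | nil => simp [PySem.List.enumerate_nil, pvKept]
  | cons r rs ih =>
    rw [PySem.List.enumerate_cons]
    have h1 : ((s : Int) + 1) = ((s + 1 : Nat) : Int) := by push_cast; ring
    simp only [List.foldl_cons, h1, ih, pvKept]
    by_cases hr : r = "no_relation" <;> simp [hr]

theorem pvKept_ge (rs : List String) (s : Nat) (i : Int) (h : i ∈ pvKept rs s) : (s : Int) ≤ i := by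
  induction rs generalizing s with
  | nil => simp [pvKept] at h
  | cons r rs ih =>
    simp only [pvKept, List.mem_append] at h
    rcases h with h | h
    · by_cases hr : r = "no_relation"
      · simp [hr] at h
      · simp [hr] at h; omega
    · have := ih (s + 1) h; push_cast at this ⊢; omega

theorem pvKept_mem_iff (rs : List String) (s : Nat) (i : Int) :
    i ∈ pvKept rs s ↔ ∃ j : Nat, j < rs.length ∧ rs.getD j "" ≠ "no_relation" ∧ i = (s : Int) + j := by
  induction rs generalizing s with
  | nil => simp [pvKept]
  | cons r rs ih =>
    simp only [pvKept, List.mem_append, ih]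
    constructor
    · rintro (h | ⟨j, hj, hne, rfl⟩)
      · split at h <;> simp_all
      · exact ⟨j + 1, by simpa using hj, by simpa using hne, by push_cast; ring⟩
    · rintro ⟨j, hj, hne, rfl⟩
      cases j with
      | zero => left; simp at hne; simp [hne]
      | succ j =>
        right; exact ⟨j, by simpa using hj, by simpa using hne, by push_cast; ring⟩

theorem pvFoldl_append_map {α β : Type} (f : α → β) (l : List α) (acc : List β) :
    l.foldl (fun acc i => acc ++ [f i]) acc = acc ++ l.map f := by
  induction l generalizing acc with
  | nil => simp
  | cons x xs ih => simp [ih]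

-- A's selected column equals the parallel filter, under the in-range hypothesis
theorem pvKept_map_get (rs : List String) (s : Nat) (cs : List String)
    (h : ∀ i ∈ pvKept rs s, i < (cs.length : Int)) :
    (pvKept rs s).map (fun i => (PySem.List.pyGet? cs i).getD "") = pvFilt (cs.drop s) rs := by
  induction rs generalizing s with
  | nil => simp [pvKept, pvFilt]
  | cons r rs ih =>
    by_cases hs : s < cs.length
    · have hdrop : cs.drop s = cs[s] :: cs.drop (s + 1) := List.drop_eq_getElem_cons hs
      by_cases hr : r = "no_relation"
      · simp only [pvKept, hr, ne_eq, not_true_eq_false, if_false, List.nil_append]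
        rw [ih (s + 1) (fun i hi => h i (by simp [pvKept, hr, hi]))]
        rw [hdrop]; simp [pvFilt]
      · simp only [pvKept, hr, ne_eq, not_false_eq_true, if_true, List.singleton_append,
          List.map_cons]
        rw [PySem.List.pyGet?_natCast, List.getElem?_eq_getElem hs]
        rw [ih (s + 1) (fun i hi => h i (by simp [pvKept, hr, hi]))]
        rw [hdrop]; simp [pvFilt, hr]
    · have hnil : pvKept (r :: rs) s = [] := by
        by_contra hne
        rcases List.exists_mem_of_ne_nil _ hne with ⟨i, hi⟩
        have h1 := pvKept_ge _ _ _ hi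
        have h2 := h i hi
        omega
      rw [hnil]
      have : cs.drop s = [] := List.drop_eq_nil_of_le (by omega)
      rw [this]
      cases rs <;> simp [pvFilt]

-- get? on mk of an append whose prefix misses the key
theorem pvGet?_mk_append (pre : List (String × List String)) (k : String) (c : List String)
    (suf : List (String × List String)) (hk : k ∉ pre.map Prod.fst) :
    (PySem.Dict.mk (pre ++ (k, c) :: suf)).get? k = some c := by
  induction pre with
  | nil => simp [PySem.Dict.get?_mk_cons]
  | cons q pre ih =>
    simp only [List.map_cons, List.mem_cons] at hk
    rw [not_or] at hk
    have hne : (q.1 == k) = false := beq_eq_false_iff_ne.mpr (fun h => hk.1 h.symm)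
    obtain ⟨a, b⟩ := q
    rw [List.cons_append, PySem.Dict.get?_mk_cons, hne]
    simpa using ih hk.2

-- insert of an existing key with unique keys rewrites that entry in place
theorem pvInsert_mk_append (pre : List (String × List String)) (k : String) (c v : List String)
    (suf : List (String × List String)) (hnd : ((pre ++ (k, c) :: suf).map Prod.fst).Nodup) :
    (PySem.Dict.mk (pre ++ (k, c) :: suf)).insert k v = PySem.Dict.mk (pre ++ (k, v) :: suf) := by
  have hkpre : k ∉ pre.map Prod.fst := by
    simp only [List.map_append, List.map_cons, List.nodup_append] at hnd
    intro hmem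
    exact hnd.2.2 k hmem k (by simp) rfl
  have hksuf : k ∉ suf.map Prod.fst := by
    simp only [List.map_append, List.map_cons] at hnd
    have h2 := hnd.of_append_right
    simp only [List.nodup_cons] at h2
    exact h2.1
  have hcontains : (PySem.Dict.mk (pre ++ (k, c) :: suf)).contains k = true := by
    rw [PySem.Dict.contains_eq_isSome_get?, pvGet?_mk_append pre k c suf hkpre]
    rfl
  apply PySem.Dict.ext
  rw [PySem.Dict.items_insert, hcontains, if_pos rfl]
  have hitems : (PySem.Dict.mk (pre ++ (k, c) :: suf)).items = pre ++ (k, c) :: suf := rfl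
  have hitems2 : (PySem.Dict.mk (pre ++ (k, v) :: suf)).items = pre ++ (k, v) :: suf := rfl
  rw [hitems, hitems2, List.map_append, List.map_cons]
  have hfix : ∀ (l : List (String × List String)), k ∉ l.map Prod.fst →
      l.map (fun p => if p.1 == k then (k, v) else p) = l := by
    intro l hl
    have hall : ∀ p ∈ l, (if p.1 == k then (k, v) else p) = p := by
      intro p hp
      have hne : p.1 ≠ k := fun h => hl (h ▸ List.mem_map_of_mem hp)
      simp [beq_eq_false_iff_ne.mpr hne]
    calc l.map (fun p => if p.1 == k then (k, v) else p) = l.map id := List.map_congr_left hall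
      _ = l := List.map_id _
  rw [hfix pre hkpre, hfix suf hksuf]
  simp

-- A's value-rewriting loop over the keys, as a map over the items
theorem pvDictLoop (F : List String → List String) :
    ∀ (suf pre : List (String × List String)),
    ((pre ++ suf).map Prod.fst).Nodup →
    ((suf.map Prod.fst).foldl
        (fun dd k => dd.insert k (F ((dd.get? k).getD []))) (PySem.Dict.mk (pre ++ suf))).items
      = pre ++ suf.map (fun p => (p.1, F p.2)) := by
  intro suf
  induction suf with
  | nil =>
    intro pre _
    simp only [List.map_nil, List.foldl_nil, List.append_nil]
  | cons q suf ih =>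
    intro pre hnd
    obtain ⟨k, c⟩ := q
    have hkpre : k ∉ pre.map Prod.fst := by
      simp only [List.map_append, List.map_cons, List.nodup_append] at hnd
      intro hmem
      exact hnd.2.2 k hmem k (by simp) rfl
    simp only [List.map_cons, List.foldl_cons]
    rw [pvGet?_mk_append pre k c suf hkpre]
    simp only [Option.getD_some]
    rw [pvInsert_mk_append pre k c (F c) suf hnd]
    have hre : pre ++ (k, F c) :: suf = (pre ++ [(k, F c)]) ++ suf := by simp
    have hnd2 : (((pre ++ [(k, F c)]) ++ suf).map Prod.fst).Nodup := by simpa using hnd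
    rw [hre, ih (pre ++ [(k, F c)]) hnd2]
    simp

-- B's value-rewriting loop over enumerate(keys), as a map over the enumerated items
theorem pvDictLoop2 (F : Int → List String) :
    ∀ (suf pre : List (String × List String)) (s : Nat),
    ((pre ++ suf).map Prod.fst).Nodup →
    ((PySem.List.enumerate (suf.map Prod.fst) (s : Int)).foldl
        (fun dd (p : Int × String) => dd.insert p.2 (F p.1)) (PySem.Dict.mk (pre ++ suf))).items
      = pre ++ (PySem.List.enumerate suf (s : Int)).map (fun q => (q.2.1, F q.1)) := by
  intro suf
  induction suf with
  | nil =>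
    intro pre s _
    simp [PySem.List.enumerate_nil]
  | cons q suf ih =>
    intro pre s hnd
    obtain ⟨k, c⟩ := q
    simp only [List.map_cons, PySem.List.enumerate_cons, List.foldl_cons]
    rw [pvInsert_mk_append pre k c (F s) suf hnd]
    have hs1 : ((s : Int) + 1) = ((s + 1 : Nat) : Int) := by push_cast; ring
    have hre : pre ++ (k, F s) :: suf = (pre ++ [(k, F s)]) ++ suf := by simp
    have hnd2 : (((pre ++ [(k, F s)]) ++ suf).map Prod.fst).Nodup := by simpa using hnd
    rw [hs1, hre, ih (pre ++ [(k, F s)]) (s + 1) hnd2]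
    simp [← hs1]

-- the A-side inner comprehension, rewritten through pvKept/pvFilt
theorem pvSelect_eq (rel col : List String)
    (h : ∀ i ∈ List.range rel.length, rel.getD i "" ≠ "no_relation" → i < col.length) :
    pvSelect ((PySem.List.enumerate rel).foldl
      (fun acc (p : Int × String) => if p.2 ≠ "no_relation" then acc ++ [p.1] else acc) []) col
    = pvFilt col rel := by
  have he : (PySem.List.enumerate rel).foldl
      (fun acc (p : Int × String) => if p.2 ≠ "no_relation" then acc ++ [p.1] else acc) []
      = pvKept rel 0 := by
    simpa using pvKept_enumerate rel 0 []
  rw [he]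
  unfold pvSelect
  rw [pvFoldl_append_map]
  have hb : ∀ i ∈ pvKept rel 0, i < (col.length : Int) := by
    intro i hi
    rcases (pvKept_mem_iff rel 0 i).mp hi with ⟨j, hj, hne, rfl⟩
    have := h j (List.mem_range.mpr hj) hne
    push_cast
    omega
  simpa using pvKept_map_get rel 0 col hb

-- getD through map, for an in-range index
theorem pvGetD_map {α β : Type} (f : α → β) (l : List α) (n : Nat) (d : α) (d' : β)
    (h : n < l.length) : (l.map f).getD n d' = f (l.getD n d) := by
  rw [List.getD_eq_getElem _ _ (by simpa using h), List.getD_eq_getElem _ _ h]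
  simp

-- if every entry of rs is "no_relation", the parallel filter is empty
theorem pvFilt_all_nr (cs rs : List String)
    (h : ∀ r ∈ rs, r = "no_relation") : pvFilt cs rs = [] := by
  induction cs generalizing rs with
  | nil => cases rs <;> simp [pvFilt]
  | cons c cs ih =>
    cases rs with
    | nil => simp [pvFilt]
    | cons r rs =>
      have hr : r = "no_relation" := h r (by simp)
      simp only [pvFilt, hr, ne_eq, not_true_eq_false, if_false]
      exact ih rs (fun x hx => h x (by simp [hx]))

theorem pvFilt_nil_right (cs : List String) : pvFilt cs [] = [] := by
  cases cs <;> simp [pvFilt]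

-- CORE: column jn of the rel-filtered transpose rows equals the parallel filter of column jn
theorem pvTR (rel : List String) : ∀ (cols : List (List String)) (ridx jn : Nat),
    ridx < cols.length → jn < cols.length → cols.getD ridx [] = rel →
    (∀ i : Nat, i < rel.length → rel.getD i "" ≠ "no_relation" → ∀ c ∈ cols, i < c.length) →
    ((pvRows cols).filter (fun row => row.getD ridx "" ≠ "no_relation")).map
        (fun row => row.getD jn "")
      = pvFilt (cols.getD jn []) rel := by
  induction rel with
  | nil =>
    intro cols ridx jn hr hj hrel _
    rw [pvFilt_nil_right]
    cases cols with
    | nil => simp at hj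
    | cons c rest =>
      have hmem : ([] : List String) ∈ c :: rest := by
        rw [← hrel, List.getD_eq_getElem _ _ hr]
        exact List.getElem_mem hr
      have hall : ((c :: rest).all (fun col => !col.isEmpty)) = false := by
        rw [List.all_eq_false]
        exact ⟨[], hmem, by simp⟩
      rw [pvRows, if_neg (by simp [hall])]
      simp
  | cons r rel' ih =>
    intro cols ridx jn hr hj hrel hb
    cases cols with
    | nil => simp at hj
    | cons c rest =>
      by_cases hall : ((c :: rest).all (fun col => !col.isEmpty)) = true
      · have hne : ∀ col ∈ c :: rest, col ≠ [] := by
          intro col hcol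
          have := List.all_eq_true.mp hall col hcol
          simpa using this
        rw [pvRows, if_pos hall]
        have hheads_r : ((c :: rest).map (fun col => col.headD "")).getD ridx ""
            = (r :: rel').headD "" := by
          rw [pvGetD_map _ _ _ [] _ hr, hrel]
        -- IH applicability for the tails
        have hr' : ridx < ((c :: rest).map List.tail).length := by simpa using hr
        have hj' : jn < ((c :: rest).map List.tail).length := by simpa using hj
        have hrel' : ((c :: rest).map List.tail).getD ridx [] = rel' := by
          rw [pvGetD_map _ _ _ [] _ hr, hrel]
          rfl
        have hb' : ∀ i : Nat, i < rel'.length → rel'.getD i "" ≠ "no_relation" →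
            ∀ c' ∈ (c :: rest).map List.tail, i < c'.length := by
          intro i hi hnr c' hc'
          rcases List.mem_map.mp hc' with ⟨col, hcol, rfl⟩
          have h1 : (r :: rel').getD (i + 1) "" ≠ "no_relation" := by simpa using hnr
          have h2 := hb (i + 1) (by simpa using hi) h1 col hcol
          simp only [List.length_tail]
          omega
        have hrec := ih ((c :: rest).map List.tail) ridx jn hr' hj' hrel' hb'
        have htail : ((c :: rest).map List.tail).getD jn [] = ((c :: rest).getD jn []).tail := by
          rw [pvGetD_map _ _ _ [] _ hj]
        rw [htail] at hrec
        -- the jn-th column is nonempty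
        have hcjmem : (c :: rest).getD jn [] ∈ c :: rest := by
          rw [List.getD_eq_getElem _ _ hj]; exact List.getElem_mem hj
        obtain ⟨x, xs, hcj⟩ : ∃ x xs, (c :: rest).getD jn [] = x :: xs := by
          cases hcase : (c :: rest).getD jn [] with
          | nil => exact absurd (hcase ▸ hcjmem) (fun h => hne [] h rfl)
          | cons x xs => exact ⟨x, xs, rfl⟩
        have hheads_j : ((c :: rest).map (fun col => col.headD "")).getD jn "" = x := by
          rw [pvGetD_map _ _ _ [] _ hj, hcj]
          simp
        by_cases hrnr : r = "no_relation"
        · rw [List.filter_cons_of_neg (by rw [hheads_r]; simp [hrnr])]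
          rw [hrec, hcj]
          simp [pvFilt, hrnr]
        · rw [List.filter_cons_of_pos (by rw [decide_eq_true_eq, hheads_r]; simp [hrnr])]
          rw [List.map_cons, hheads_j, hrec, hcj]
          simp [pvFilt, hrnr]
      · -- some column is empty: every rel entry with a kept index would be out of range
        rw [pvRows, if_neg hall]
        simp only [List.filter_nil, List.map_nil]
        simp only [Bool.not_eq_true] at hall
        rw [List.all_eq_false] at hall
        obtain ⟨col0, hcol0, hcol0e⟩ := hall
        have hcol0nil : col0 = [] := by simpa using hcol0e
        have hallnr : ∀ s ∈ r :: rel', s = "no_relation" := by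
          intro s hs
          by_contra hsne
          rcases List.getElem_of_mem hs with ⟨i, hi, hig⟩
          have h1 : (r :: rel').getD i "" ≠ "no_relation" := by
            rw [List.getD_eq_getElem _ _ hi, hig]; exact hsne
          have := hb i hi h1 col0 hcol0
          rw [hcol0nil] at this
          simp at this
        exact (pvFilt_all_nr _ _ hallnr).symm

-- with unique keys, looking the keys back up returns the original columns
theorem pvColsEq (data : List (String × List String)) (hnd : (data.map Prod.fst).Nodup) :
    (data.map Prod.fst).map (fun k => ((PySem.Dict.mk data).get? k).getD [])
      = data.map Prod.snd := by
  induction data with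
  | nil => simp
  | cons q t ih =>
    obtain ⟨k, c⟩ := q
    simp only [List.map_cons, List.nodup_cons] at hnd ⊢
    congr 1
    · rw [PySem.Dict.get?_mk_cons]
      simp
    · have hcong : ∀ k' ∈ t.map Prod.fst,
          ((PySem.Dict.mk ((k, c) :: t)).get? k').getD []
            = ((PySem.Dict.mk t).get? k').getD [] := by
        intro k' hk'
        have hne : (k == k') = false := beq_eq_false_iff_ne.mpr (fun h => hnd.1 (h ▸ hk'))
        rw [PySem.Dict.get?_mk_cons, hne]
        simp
      rw [List.map_congr_left hcong]
      exact ih hnd.2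

-- a key whose lookup succeeds is among the stored keys
theorem pvMem_of_get?_isSome (data : List (String × List String)) (k : String)
    (h : ((PySem.Dict.mk data).get? k).isSome = true) : k ∈ data.map Prod.fst := by
  induction data with
  | nil =>
    have hnone : (PySem.Dict.mk ([] : List (String × List String))).get? k = none := rfl
    rw [hnone] at h
    simp at h
  | cons q t ih =>
    obtain ⟨a, b⟩ := q
    rw [PySem.Dict.get?_mk_cons] at h
    by_cases hak : (a == k) = true
    · simp [beq_iff_eq.mp hak]
    · rw [Bool.not_eq_true] at hak
      rw [hak] at h
      simp only [List.map_cons, List.mem_cons]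
      exact Or.inr (ih h)

-- A's return value in closed form
theorem pvA_eq (data : List (String × List String)) (rel_key : String)
    (hnd : (data.map Prod.fst).Nodup)
    (hbound : ∀ p ∈ data, ∀ i ∈ List.range (((PySem.Dict.mk data).get? rel_key).getD []).length,
        (((PySem.Dict.mk data).get? rel_key).getD []).getD i "" ≠ "no_relation" → i < p.2.length) :
    eliminate_noRelation data rel_key
      = data.map (fun p => (p.1, pvFilt p.2 (((PySem.Dict.mk data).get? rel_key).getD []))) := by
  unfold eliminate_noRelation
  have hloop := pvDictLoop (pvSelect (pvIdxs data rel_key)) data [] (by simpa using hnd)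
  simp only [List.nil_append] at hloop
  have hkeys : (PySem.Dict.mk data).keys = data.map Prod.fst := rfl
  rw [hkeys, hloop]
  apply List.map_congr_left
  intro p hp
  have h1 : pvIdxs data rel_key
      = (PySem.List.enumerate (((PySem.Dict.mk data).get? rel_key).getD [])).foldl
          (fun acc (p : Int × String) => if p.2 ≠ "no_relation" then acc ++ [p.1] else acc) [] := rfl
  rw [h1, pvSelect_eq (((PySem.Dict.mk data).get? rel_key).getD []) p.2 (hbound p hp)]

-- ===== VERDICT (by name: the statement is the Claim_ definition above) =====
theorem eliminate_noRelation_spec : Claim_equal_eliminate_noRelation := by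
  intro data rel_key _hdom hpre
  obtain ⟨hnd, hsome, hbound⟩ := hpre
  unfold Spec_eliminate_noRelation
  set rel : List String := ((PySem.Dict.mk data).get? rel_key).getD [] with hrel_def
  -- B's return value
  unfold eliminate_noRelation_alt
  have hkeys : (PySem.Dict.mk data).keys = data.map Prod.fst := rfl
  simp only [hkeys]
  set cols : List (List String) :=
    (data.map Prod.fst).map (fun k => ((PySem.Dict.mk data).get? k).getD []) with hcols_def
  have hcols : cols = data.map Prod.snd := pvColsEq data hnd
  -- rel_key sits at a real index of the keys
  have hmemk : rel_key ∈ data.map Prod.fst := pvMem_of_get?_isSome data rel_key hsome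
  obtain ⟨ri, hri'⟩ := Option.isSome_iff_exists.mp (List.isSome_idxOf?.mpr hmemk)
  have hri : PySem.List.index? (data.map Prod.fst) rel_key = some ri := by
    rw [PySem.List.index?_eq_idxOf?, hri']
  obtain ⟨hrilt, hrikey, _⟩ := PySem.List.getElem_of_index?_eq_some hri
  have hridx : (PySem.List.index? (data.map Prod.fst) rel_key).getD 0 = ri := by
    rw [hri]; rfl
  simp only [hridx]
  -- the rel column is column ri of cols
  have hcolrel : cols.getD ri [] = rel := by
    rw [hcols_def, pvGetD_map _ _ _ "" _ hrilt, List.getD_eq_getElem _ _ hrilt, hrikey]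
  -- the B loop as a map
  have hloop2 := pvDictLoop2
    (fun i => (((pvRows cols).filter
        (fun row => (PySem.List.pyGet? row ((ri : Nat) : Int)).getD "" ≠ "no_relation")).map
        (fun row => (PySem.List.pyGet? row i).getD ""))) data [] 0 (by simpa using hnd)
  simp only [List.nil_append, Nat.cast_zero] at hloop2
  rw [hloop2]
  -- A's return value
  rw [pvA_eq data rel_key hnd hbound, ← hrel_def]
  -- pointwise comparison
  apply List.ext_getElem
  · simp [PySem.List.length_enumerate]
  · intro jn hjn1 hjn2
    have hjlen : jn < data.length := by simpa using hjn1
    have henum : (PySem.List.enumerate data (0 : Int))[jn]'(by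
          simpa [PySem.List.length_enumerate] using hjlen)
        = ((0 : Int) + jn, data[jn]'hjlen) :=
      PySem.List.getElem_enumerate _ _ _ _
    simp only [List.getElem_map, henum]
    refine Prod.ext rfl ?_
    simp only [zero_add]
    -- rewrite pyGet? at natural indices into getD
    have hpy : ∀ (row : List String) (n : Nat),
        (PySem.List.pyGet? row ((n : Nat) : Int)).getD "" = row.getD n "" := by
      intro row n
      rw [PySem.List.pyGet?_natCast]
      simp [List.getD_eq_getElem?_getD]
    have hfilter : (pvRows cols).filter
          (fun row => (PySem.List.pyGet? row ((ri : Nat) : Int)).getD "" ≠ "no_relation")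
        = (pvRows cols).filter (fun row => row.getD ri "" ≠ "no_relation") := by
      apply List.filter_congr
      intro row _
      rw [hpy row ri]
    have hbnd : ∀ i : Nat, i < rel.length → rel.getD i "" ≠ "no_relation" →
        ∀ c ∈ cols, i < c.length := by
      intro i hi hnr c hc
      rw [hcols] at hc
      rcases List.mem_map.mp hc with ⟨p, hp, rfl⟩
      exact hbound p hp i (List.mem_range.mpr hi) hnr
    have hjcols : jn < cols.length := by rw [hcols]; simpa using hjlen
    have hricols : ri < cols.length := by rw [hcols_def]; simpa using hrilt
    have htr := pvTR rel cols ri jn hricols hjcols hcolrel hbnd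
    refine Eq.symm ?_
    calc ((pvRows cols).filter
            (fun row => (PySem.List.pyGet? row ((ri : Nat) : Int)).getD "" ≠ "no_relation")).map
            (fun row => (PySem.List.pyGet? row ((jn : Nat) : Int)).getD "")
        = ((pvRows cols).filter (fun row => row.getD ri "" ≠ "no_relation")).map
            (fun row => row.getD jn "") := by
          rw [hfilter]; exact List.map_congr_left (fun row _ => hpy row jn)
      _ = pvFilt (cols.getD jn []) rel := htr
      _ = pvFilt (data[jn]).2 rel := by
          rw [hcols, pvGetD_map _ _ _ default _ hjlen, List.getD_eq_getElem _ _ hjlen]
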